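-- pv_equiv track=rewrite | github.com/ed3642/NeetCode | python/greedy/find_even_numbers.py | findEvenNumbers2
-- ===== SOURCE A (Python) =====
-- from typing import List
--
-- def findEvenNumbers2(digits: List[int]) -> List[int]:
--     N = len(digits)
--     possible = set()
--
--     for i in range(N):
--         if digits[i] == 0:
--             continue
--         for j in range(N):
--             if i == j:
--                 continue
--             for k in range(N):
--                 if j == k or i == k:
--                     continue
--                 if digits[k] % 2 != 0:
--                     continue
--                 possible.add(int(digits[i] * 100 + digits[j] * 10 + digits[k]))
--
--     return sorted(possible)
-- ===== SOURCE B (Python) =====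
-- from typing import List
--
-- def findEvenNumbers2(digits: List[int]) -> List[int]:
--     # Count multiplicities once, then enumerate triples of DISTINCT values,
--     # checking that the list holds enough copies of each chosen value.
--     cnt = {}
--     for d in digits:
--         cnt[d] = cnt.get(d, 0) + 1
--     vals = list(cnt)
--     res = set()
--     for a in vals:
--         if a == 0:
--             continue
--         for b in vals:
--             for c in vals:
--                 if c % 2 != 0:
--                     continue
--                 if cnt[a] < 1 + (b == a) + (c == a):
--                     continue
--                 if cnt[b] < (a == b) + 1 + (c == b):
--                     continue
--                 if cnt[c] < (a == c) + (b == c) + 1: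
--                     continue
--                 res.add(100 * a + 10 * b + c)
--     return sorted(res)
-- ===== Notes on version B (the rewrite author's own statement) =====
-- stated objective: alternative
-- what changed: B replaces A's triple loop over index positions by a frequency dictionary built in one pass plus a triple loop over the distinct values only, checking multiplicities (O(N + m^3) with m distinct values, vs A's O(N^3)); exact speed-up shows only on duplicate-heavy input, so no speed is claimed.
import Mathlib
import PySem

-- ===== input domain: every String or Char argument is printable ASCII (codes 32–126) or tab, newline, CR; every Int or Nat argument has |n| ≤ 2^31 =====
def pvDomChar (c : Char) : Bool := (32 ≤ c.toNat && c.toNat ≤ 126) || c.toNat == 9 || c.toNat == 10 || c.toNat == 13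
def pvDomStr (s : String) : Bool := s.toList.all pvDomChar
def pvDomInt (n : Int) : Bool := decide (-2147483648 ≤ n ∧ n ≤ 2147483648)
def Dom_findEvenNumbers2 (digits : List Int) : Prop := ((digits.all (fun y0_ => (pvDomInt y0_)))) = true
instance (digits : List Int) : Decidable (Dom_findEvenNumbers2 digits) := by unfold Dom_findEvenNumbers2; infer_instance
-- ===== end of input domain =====

-- B replaces A's O(N^3) scan over index triples by a value-frequency dictionary plus a scan
-- over triples of DISTINCT values with multiplicity checks (objective: alternative algorithm).

-- ===== PORT A =====
-- A's three nested index loops, innermost first (helpers keep the nesting readable).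
def pvA_inner (digits : List Int) (N i j : Int) (s : PySem.Set Int) : PySem.Set Int :=
  (PySem.List.pyRange 0 N 1).foldl (fun s k =>
    if j = k ∨ i = k then s
    else if PySem.Int.mod (PySem.List.pyGetD digits k 0) 2 ≠ 0 then s
    else PySem.Set.add s (PySem.List.pyGetD digits i 0 * 100 +
                          PySem.List.pyGetD digits j 0 * 10 +
                          PySem.List.pyGetD digits k 0)) s

def pvA_mid (digits : List Int) (N i : Int) (s : PySem.Set Int) : PySem.Set Int :=
  (PySem.List.pyRange 0 N 1).foldl (fun s j => if i = j then s else pvA_inner digits N i j s) s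

def pvA_outer (digits : List Int) (N : Int) : PySem.Set Int :=
  (PySem.List.pyRange 0 N 1).foldl
    (fun s i => if PySem.List.pyGetD digits i 0 = 0 then s else pvA_mid digits N i s)
    PySem.Set.empty

def findEvenNumbers2 (digits : List Int) : List Int :=
  PySem.List.sorted (pvA_outer digits (digits.length : Int)) (fun x => x) false

-- ===== PORT B =====
-- B's three nested loops over the distinct values, innermost first.
def pvB_inner (cnt : PySem.Dict Int Int) (vals : List Int) (a b : Int) (s : PySem.Set Int) : PySem.Set Int :=
  vals.foldl (fun s c =>
    if PySem.Int.mod c 2 ≠ 0 then s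
    else if cnt.getD a 0 < 1 + (if b = a then 1 else 0) + (if c = a then 1 else 0) then s
    else if cnt.getD b 0 < (if a = b then 1 else 0) + 1 + (if c = b then 1 else 0) then s
    else if cnt.getD c 0 < (if a = c then 1 else 0) + (if b = c then 1 else 0) + 1 then s
    else PySem.Set.add s (100 * a + 10 * b + c)) s

def pvB_mid (cnt : PySem.Dict Int Int) (vals : List Int) (a : Int) (s : PySem.Set Int) : PySem.Set Int :=
  vals.foldl (fun s b => pvB_inner cnt vals a b s) s

def pvB_outer (cnt : PySem.Dict Int Int) (vals : List Int) : PySem.Set Int :=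
  vals.foldl (fun s a => if a = 0 then s else pvB_mid cnt vals a s) PySem.Set.empty

def findEvenNumbers2_alt (digits : List Int) : List Int :=
  let cnt : PySem.Dict Int Int :=
    digits.foldl (fun d x => d.insert x (d.getD x 0 + 1)) PySem.Dict.empty
  let vals := cnt.keys
  PySem.List.sorted (pvB_outer cnt vals) (fun x => x) false

-- ===== PRECONDITION & SPEC =====
def Spec_findEvenNumbers2 (digits : List Int) (out : List Int) : Prop := out = findEvenNumbers2_alt digits
instance (digits : List Int) (out : List Int) : Decidable (Spec_findEvenNumbers2 digits out) := by unfold Spec_findEvenNumbers2; infer_instance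

-- ===== CLAIM (what is proved, stated in full; the proofs are below) =====
def Claim_equal_findEvenNumbers2 : Prop := ∀ (digits : List Int), Dom_findEvenNumbers2 digits → Spec_findEvenNumbers2 digits (findEvenNumbers2 digits)

-- ===== LEMMAS AND PROOFS =====

-- membership in a set built by a fold that conditionally adds one element per list item
theorem pv_mem_foldl_set {α : Type} (l : List α) (g : PySem.Set Int → α → PySem.Set Int)
    (v : Int) (Q : α → Prop) (hg : ∀ s x, v ∈ g s x ↔ v ∈ s ∨ Q x) (s0 : PySem.Set Int) :
    v ∈ l.foldl g s0 ↔ v ∈ s0 ∨ ∃ x ∈ l, Q x := by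
  induction l generalizing s0 with
  | nil => simp
  | cons a t ih =>
      rw [List.foldl_cons, ih, hg s0 a]
      constructor
      · rintro ((h | h) | ⟨x, hx, hQ⟩)
        · exact Or.inl h
        · exact Or.inr ⟨a, List.mem_cons_self, h⟩
        · exact Or.inr ⟨x, List.mem_cons_of_mem _ hx, hQ⟩
      · rintro (h | ⟨x, hx, hQ⟩)
        · exact Or.inl (Or.inl h)
        · rcases List.mem_cons.mp hx with rfl | hx
          · exact Or.inl (Or.inr hQ)
          · exact Or.inr ⟨x, hx, hQ⟩

theorem pv_nodup_foldl_set {α : Type} (l : List α) (g : PySem.Set Int → α → PySem.Set Int)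
    (hg : ∀ s x, s.Nodup → (g s x).Nodup) (s0 : PySem.Set Int) (h0 : s0.Nodup) :
    (l.foldl g s0).Nodup := by
  induction l generalizing s0 with
  | nil => exact h0
  | cons a t ih => exact ih _ (hg s0 a h0)

-- "three values can be read off three pairwise distinct positions"
def Pick3 (l : List Int) (a b c : Int) : Prop :=
  ∃ i j k : Nat, i < l.length ∧ j < l.length ∧ k < l.length ∧
    i ≠ j ∧ j ≠ k ∧ i ≠ k ∧ l.getD i 0 = a ∧ l.getD j 0 = b ∧ l.getD k 0 = c

def Pick2 (l : List Int) (b c : Int) : Prop :=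
  ∃ j k : Nat, j < l.length ∧ k < l.length ∧ j ≠ k ∧ l.getD j 0 = b ∧ l.getD k 0 = c

-- index transport through eraseIdx
def pvEmap (i j : Nat) : Nat := if j < i then j else j - 1
def pvEinv (i j' : Nat) : Nat := if j' < i then j' else j' + 1

theorem pvEmap_spec (l : List Int) (i j : Nat) (hi : i < l.length) (hj : j < l.length)
    (hne : j ≠ i) :
    pvEmap i j < (l.eraseIdx i).length ∧ (l.eraseIdx i).getD (pvEmap i j) 0 = l.getD j 0 := by
  have hlen : (l.eraseIdx i).length = l.length - 1 := by
    rw [List.length_eraseIdx]; simp [hi]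
  have hlt : pvEmap i j < (l.eraseIdx i).length := by
    unfold pvEmap; rw [hlen]; split <;> omega
  refine ⟨hlt, ?_⟩
  rw [List.getD_eq_getElem _ _ hlt, List.getD_eq_getElem _ _ hj, List.getElem_eraseIdx]
  unfold pvEmap
  by_cases h : j < i
  · simp [h]
  · have h1 : ¬ (j - 1 < i) := by omega
    simp only [if_neg h, dif_neg h1]
    congr 1
    omega

theorem pvEinv_spec (l : List Int) (i j' : Nat) (hi : i < l.length)
    (hj' : j' < (l.eraseIdx i).length) :
    pvEinv i j' < l.length ∧ pvEinv i j' ≠ i ∧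
      l.getD (pvEinv i j') 0 = (l.eraseIdx i).getD j' 0 := by
  have hlen : (l.eraseIdx i).length = l.length - 1 := by
    rw [List.length_eraseIdx]; simp [hi]
  have hlt : pvEinv i j' < l.length := by unfold pvEinv; split <;> omega
  have hne : pvEinv i j' ≠ i := by unfold pvEinv; split <;> omega
  refine ⟨hlt, hne, ?_⟩
  rw [List.getD_eq_getElem _ _ hlt, List.getD_eq_getElem _ _ hj', List.getElem_eraseIdx]
  unfold pvEinv
  by_cases h : j' < i
  · simp [h]
  · simp [h]

theorem pv_coe_erase (l : List Int) (i : Nat) (hi : i < l.length) :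
    (↑l : Multiset Int) = l[i] ::ₘ ↑(l.eraseIdx i) := by
  rw [Multiset.cons_coe]
  exact (Multiset.coe_eq_coe.mpr (List.getElem_cons_eraseIdx_perm hi)).symm

theorem pick2_iff (l : List Int) (b c : Int) :
    Pick2 l b c ↔ (b ::ₘ {c} : Multiset Int) ≤ ↑l := by
  constructor
  · rintro ⟨j, k, hj, hk, hjk, hb, hc⟩
    obtain ⟨hk', hv⟩ := pvEmap_spec l j k hj hk (Ne.symm hjk)
    have hcmem : c ∈ l.eraseIdx j := by
      rw [← hc, ← hv, List.getD_eq_getElem _ _ hk']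
      exact List.getElem_mem hk'
    have : (↑l : Multiset Int) = b ::ₘ ↑(l.eraseIdx j) := by
      rw [pv_coe_erase l j hj]; congr 1; rw [← hb, List.getD_eq_getElem _ _ hj]
    rw [this]
    exact Multiset.cons_le_cons b (Multiset.singleton_le.mpr (by exact_mod_cast hcmem))
  · intro hle
    have hbmem : b ∈ l := by
      have := Multiset.mem_of_le hle (s := b ::ₘ {c}) (Multiset.mem_cons_self b {c})
      exact_mod_cast this
    obtain ⟨j, hj, hbj⟩ := List.mem_iff_getElem.mp hbmem
    have hcoe : (↑l : Multiset Int) = b ::ₘ ↑(l.eraseIdx j) := by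
      rw [pv_coe_erase l j hj, hbj]
    rw [hcoe, Multiset.cons_le_cons_iff, Multiset.singleton_le] at hle
    have hcmem : c ∈ l.eraseIdx j := by exact_mod_cast hle
    obtain ⟨k', hk', hck⟩ := List.mem_iff_getElem.mp hcmem
    obtain ⟨hklt, hkne, hkv⟩ := pvEinv_spec l j k' hj hk'
    exact ⟨j, pvEinv j k', hj, hklt, Ne.symm hkne,
      by rw [List.getD_eq_getElem _ _ hj]; exact hbj,
      by rw [hkv, List.getD_eq_getElem _ _ hk']; exact hck⟩

theorem pick3_iff (l : List Int) (a b c : Int) :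
    Pick3 l a b c ↔ (a ::ₘ b ::ₘ {c} : Multiset Int) ≤ ↑l := by
  constructor
  · rintro ⟨i, j, k, hi, hj, hk, hij, hjk, hik, ha, hb, hc⟩
    obtain ⟨hj', hvj⟩ := pvEmap_spec l i j hi hj (Ne.symm hij)
    obtain ⟨hk', hvk⟩ := pvEmap_spec l i k hi hk (Ne.symm hik)
    have hjk' : pvEmap i j ≠ pvEmap i k := by
      unfold pvEmap; split <;> split <;> omega
    have hp2 : Pick2 (l.eraseIdx i) b c :=
      ⟨pvEmap i j, pvEmap i k, hj', hk', hjk', by rw [hvj]; exact hb, by rw [hvk]; exact hc⟩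
    have hcoe : (↑l : Multiset Int) = a ::ₘ ↑(l.eraseIdx i) := by
      rw [pv_coe_erase l i hi]; congr 1; rw [← ha, List.getD_eq_getElem _ _ hi]
    rw [hcoe]
    exact Multiset.cons_le_cons a ((pick2_iff _ b c).mp hp2)
  · intro hle
    have hamem : a ∈ l := by
      have := Multiset.mem_of_le hle (Multiset.mem_cons_self a _)
      exact_mod_cast this
    obtain ⟨i, hi, hai⟩ := List.mem_iff_getElem.mp hamem
    have hcoe : (↑l : Multiset Int) = a ::ₘ ↑(l.eraseIdx i) := by
      rw [pv_coe_erase l i hi, hai]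
    rw [hcoe, Multiset.cons_le_cons_iff] at hle
    obtain ⟨j', k', hj', hk', hjk', hbv, hcv⟩ := (pick2_iff _ b c).mpr hle
    obtain ⟨hjlt, hjne, hjv⟩ := pvEinv_spec l i j' hi hj'
    obtain ⟨hklt, hkne, hkv⟩ := pvEinv_spec l i k' hi hk'
    have hinj : pvEinv i j' ≠ pvEinv i k' := by
      unfold pvEinv; split <;> split <;> omega
    exact ⟨i, pvEinv i j', pvEinv i k', hi, hjlt, hklt,
      Ne.symm hjne, hinj, Ne.symm hkne,
      by rw [List.getD_eq_getElem _ _ hi]; exact hai,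
      by rw [hjv]; exact hbv, by rw [hkv]; exact hcv⟩

theorem sub3_iff_counts (l : List Int) (a b c : Int) :
    (a ::ₘ b ::ₘ {c} : Multiset Int) ≤ ↑l ↔
      (1 + (if b = a then 1 else 0) + (if c = a then 1 else 0) ≤ l.count a)
      ∧ ((if a = b then 1 else 0) + 1 + (if c = b then 1 else 0) ≤ l.count b)
      ∧ ((if a = c then 1 else 0) + (if b = c then 1 else 0) + 1 ≤ l.count c) := by
  rw [Multiset.le_iff_count]
  constructor
  · intro h
    have ha := h a
    have hb := h b
    have hc := h c
    simp only [Multiset.count_cons, Multiset.count_singleton, Multiset.coe_count] at ha hb hc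
    refine ⟨?_, ?_, ?_⟩ <;> (split_ifs at * <;> omega)
  · rintro ⟨ha, hb, hc⟩ x
    simp only [Multiset.count_cons, Multiset.count_singleton, Multiset.coe_count]
    by_cases hxa : x = a
    · subst hxa; split_ifs at * <;> omega
    · by_cases hxb : x = b
      · subst hxb; split_ifs at * <;> omega
      · by_cases hxc : x = c
        · subst hxc; split_ifs at * <;> omega
        · split_ifs at * <;> omega

-- ----- membership characterisation of A's set -----
theorem memA_inner (digits : List Int) (N i j : Int) (s : PySem.Set Int) (v : Int) :
    v ∈ pvA_inner digits N i j s ↔ v ∈ s ∨ ∃ k : Int, (0 ≤ k ∧ k < N) ∧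
      ¬(j = k ∨ i = k) ∧ PySem.Int.mod (PySem.List.pyGetD digits k 0) 2 = 0 ∧
      v = PySem.List.pyGetD digits i 0 * 100 + PySem.List.pyGetD digits j 0 * 10 +
          PySem.List.pyGetD digits k 0 := by
  unfold pvA_inner
  have hg : ∀ (s : PySem.Set Int) (k : Int),
      v ∈ (if j = k ∨ i = k then s
           else if PySem.Int.mod (PySem.List.pyGetD digits k 0) 2 ≠ 0 then s
           else PySem.Set.add s (PySem.List.pyGetD digits i 0 * 100 +
                PySem.List.pyGetD digits j 0 * 10 + PySem.List.pyGetD digits k 0)) ↔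
        v ∈ s ∨ (¬(j = k ∨ i = k) ∧ PySem.Int.mod (PySem.List.pyGetD digits k 0) 2 = 0 ∧
          v = PySem.List.pyGetD digits i 0 * 100 + PySem.List.pyGetD digits j 0 * 10 +
              PySem.List.pyGetD digits k 0) := by
    intro s k
    by_cases h1 : j = k ∨ i = k
    · rw [if_pos h1]
      constructor
      · exact Or.inl
      · rintro (h | ⟨hq, _, _⟩)
        · exact h
        · exact absurd h1 hq
    · rw [if_neg h1]
      by_cases h2 : PySem.Int.mod (PySem.List.pyGetD digits k 0) 2 = 0
      · rw [if_neg (not_not_intro h2), PySem.Set.mem_add]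
        constructor
        · rintro (h | h)
          · exact Or.inl h
          · exact Or.inr ⟨h1, h2, h⟩
        · rintro (h | ⟨_, _, h⟩)
          · exact Or.inl h
          · exact Or.inr h
      · rw [if_pos h2]
        constructor
        · exact Or.inl
        · rintro (h | ⟨_, hq, _⟩)
          · exact h
          · exact absurd hq h2
  rw [pv_mem_foldl_set _ _ v _ hg]
  simp only [PySem.List.mem_pyRange_one]

theorem memA_mid (digits : List Int) (N i : Int) (s : PySem.Set Int) (v : Int) :
    v ∈ pvA_mid digits N i s ↔ v ∈ s ∨ ∃ j : Int, (0 ≤ j ∧ j < N) ∧ i ≠ j ∧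
      ∃ k : Int, (0 ≤ k ∧ k < N) ∧ ¬(j = k ∨ i = k) ∧
        PySem.Int.mod (PySem.List.pyGetD digits k 0) 2 = 0 ∧
        v = PySem.List.pyGetD digits i 0 * 100 + PySem.List.pyGetD digits j 0 * 10 +
            PySem.List.pyGetD digits k 0 := by
  unfold pvA_mid
  have hg : ∀ (s : PySem.Set Int) (j : Int),
      v ∈ (if i = j then s else pvA_inner digits N i j s) ↔
        v ∈ s ∨ (i ≠ j ∧ ∃ k : Int, (0 ≤ k ∧ k < N) ∧ ¬(j = k ∨ i = k) ∧
          PySem.Int.mod (PySem.List.pyGetD digits k 0) 2 = 0 ∧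
          v = PySem.List.pyGetD digits i 0 * 100 + PySem.List.pyGetD digits j 0 * 10 +
              PySem.List.pyGetD digits k 0) := by
    intro s j
    by_cases h1 : i = j
    · rw [if_pos h1]
      constructor
      · exact Or.inl
      · rintro (h | ⟨hq, _⟩)
        · exact h
        · exact absurd h1 hq
    · rw [if_neg h1, memA_inner]
      constructor
      · rintro (h | ⟨k, hk⟩)
        · exact Or.inl h
        · exact Or.inr ⟨h1, k, hk⟩
      · rintro (h | ⟨_, k, hk⟩)
        · exact Or.inl h
        · exact Or.inr ⟨k, hk⟩
  rw [pv_mem_foldl_set _ _ v _ hg]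
  simp only [PySem.List.mem_pyRange_one]

theorem memA_outer (digits : List Int) (N : Int) (v : Int) :
    v ∈ pvA_outer digits N ↔ ∃ i : Int, (0 ≤ i ∧ i < N) ∧
      PySem.List.pyGetD digits i 0 ≠ 0 ∧ ∃ j : Int, (0 ≤ j ∧ j < N) ∧ i ≠ j ∧
      ∃ k : Int, (0 ≤ k ∧ k < N) ∧ ¬(j = k ∨ i = k) ∧
        PySem.Int.mod (PySem.List.pyGetD digits k 0) 2 = 0 ∧
        v = PySem.List.pyGetD digits i 0 * 100 + PySem.List.pyGetD digits j 0 * 10 +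
            PySem.List.pyGetD digits k 0 := by
  unfold pvA_outer
  have hg : ∀ (s : PySem.Set Int) (i : Int),
      v ∈ (if PySem.List.pyGetD digits i 0 = 0 then s else pvA_mid digits N i s) ↔
        v ∈ s ∨ (PySem.List.pyGetD digits i 0 ≠ 0 ∧ ∃ j : Int, (0 ≤ j ∧ j < N) ∧ i ≠ j ∧
          ∃ k : Int, (0 ≤ k ∧ k < N) ∧ ¬(j = k ∨ i = k) ∧
            PySem.Int.mod (PySem.List.pyGetD digits k 0) 2 = 0 ∧
            v = PySem.List.pyGetD digits i 0 * 100 + PySem.List.pyGetD digits j 0 * 10 +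
                PySem.List.pyGetD digits k 0) := by
    intro s i
    by_cases h1 : PySem.List.pyGetD digits i 0 = 0
    · rw [if_pos h1]
      constructor
      · exact Or.inl
      · rintro (h | ⟨hq, _⟩)
        · exact h
        · exact absurd h1 hq
    · rw [if_neg h1, memA_mid]
      constructor
      · rintro (h | ⟨j, hj⟩)
        · exact Or.inl h
        · exact Or.inr ⟨h1, j, hj⟩
      · rintro (h | ⟨_, j, hj⟩)
        · exact Or.inl h
        · exact Or.inr ⟨j, hj⟩
  rw [pv_mem_foldl_set _ _ v _ hg]
  simp only [PySem.List.mem_pyRange_one, PySem.Set.empty, List.not_mem_nil, false_or]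

-- A's set in value form
theorem memA (digits : List Int) (v : Int) :
    v ∈ pvA_outer digits (digits.length : Int) ↔
      ∃ a b c : Int, Pick3 digits a b c ∧ a ≠ 0 ∧ PySem.Int.mod c 2 = 0 ∧
        v = a * 100 + b * 10 + c := by
  rw [memA_outer]
  constructor
  · rintro ⟨i, ⟨hi0, hiN⟩, hnz, j, ⟨hj0, hjN⟩, hij, k, ⟨hk0, hkN⟩, hjk, hmod, hv⟩
    rw [not_or] at hjk
    obtain ⟨hjk, hik⟩ := hjk
    refine ⟨PySem.List.pyGetD digits i 0, PySem.List.pyGetD digits j 0,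
      PySem.List.pyGetD digits k 0, ?_, hnz, hmod, hv⟩
    refine ⟨i.toNat, j.toNat, k.toNat, ?_, ?_, ?_, ?_, ?_, ?_, ?_, ?_, ?_⟩ <;>
      try omega
    · rw [← PySem.List.pyGetD_natCast digits i.toNat 0, Int.toNat_of_nonneg hi0]
    · rw [← PySem.List.pyGetD_natCast digits j.toNat 0, Int.toNat_of_nonneg hj0]
    · rw [← PySem.List.pyGetD_natCast digits k.toNat 0, Int.toNat_of_nonneg hk0]
  · rintro ⟨a, b, c, ⟨i, j, k, hi, hj, hk, hij, hjk, hik, ha, hb, hc⟩, hnz, hmod, hv⟩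
    refine ⟨(i : Int), ⟨by omega, by omega⟩, ?_, (j : Int), ⟨by omega, by omega⟩, ?_,
      (k : Int), ⟨by omega, by omega⟩, ?_, ?_, ?_⟩
    · rw [PySem.List.pyGetD_natCast, ha]; exact hnz
    · omega
    · rw [not_or]; constructor <;> omega
    · rw [PySem.List.pyGetD_natCast, hc]; exact hmod
    · rw [PySem.List.pyGetD_natCast, PySem.List.pyGetD_natCast, PySem.List.pyGetD_natCast,
        ha, hb, hc]; exact hv

-- ----- membership characterisation of B's set -----
theorem memB_inner (digits : List Int) (a b : Int) (s : PySem.Set Int) (v : Int) :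
    v ∈ pvB_inner (PySem.Dict.counter digits) (PySem.Set.ofList digits) a b s ↔
      v ∈ s ∨ ∃ c : Int, c ∈ digits ∧ PySem.Int.mod c 2 = 0 ∧
        ¬((digits.count a : Int) < 1 + (if b = a then 1 else 0) + (if c = a then 1 else 0)) ∧
        ¬((digits.count b : Int) < (if a = b then 1 else 0) + 1 + (if c = b then 1 else 0)) ∧
        ¬((digits.count c : Int) < (if a = c then 1 else 0) + (if b = c then 1 else 0) + 1) ∧
        v = 100 * a + 10 * b + c := by
  unfold pvB_inner
  have hg : ∀ (s : PySem.Set Int) (c : Int),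
      v ∈ (if PySem.Int.mod c 2 ≠ 0 then s
           else if (PySem.Dict.counter digits).getD a 0 <
                  1 + (if b = a then 1 else 0) + (if c = a then 1 else 0) then s
           else if (PySem.Dict.counter digits).getD b 0 <
                  (if a = b then 1 else 0) + 1 + (if c = b then 1 else 0) then s
           else if (PySem.Dict.counter digits).getD c 0 <
                  (if a = c then 1 else 0) + (if b = c then 1 else 0) + 1 then s
           else PySem.Set.add s (100 * a + 10 * b + c)) ↔
        v ∈ s ∨ (PySem.Int.mod c 2 = 0 ∧
          ¬((digits.count a : Int) < 1 + (if b = a then 1 else 0) + (if c = a then 1 else 0)) ∧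
          ¬((digits.count b : Int) < (if a = b then 1 else 0) + 1 + (if c = b then 1 else 0)) ∧
          ¬((digits.count c : Int) < (if a = c then 1 else 0) + (if b = c then 1 else 0) + 1) ∧
          v = 100 * a + 10 * b + c) := by
    intro s c
    simp only [PySem.Dict.getD_counter]
    by_cases h1 : PySem.Int.mod c 2 = 0
    · rw [if_neg (not_not_intro h1)]
      by_cases h2 : (digits.count a : Int) < 1 + (if b = a then 1 else 0) + (if c = a then 1 else 0)
      · rw [if_pos h2]
        constructor
        · exact Or.inl
        · rintro (h | ⟨_, hq, _⟩)
          · exact h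
          · exact absurd h2 hq
      · rw [if_neg h2]
        by_cases h3 : (digits.count b : Int) < (if a = b then 1 else 0) + 1 + (if c = b then 1 else 0)
        · rw [if_pos h3]
          constructor
          · exact Or.inl
          · rintro (h | ⟨_, _, hq, _⟩)
            · exact h
            · exact absurd h3 hq
        · rw [if_neg h3]
          by_cases h4 : (digits.count c : Int) < (if a = c then 1 else 0) + (if b = c then 1 else 0) + 1
          · rw [if_pos h4]
            constructor
            · exact Or.inl
            · rintro (h | ⟨_, _, _, hq, _⟩)
              · exact h
              · exact absurd h4 hq
          · rw [if_neg h4, PySem.Set.mem_add]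
            constructor
            · rintro (h | h)
              · exact Or.inl h
              · exact Or.inr ⟨h1, h2, h3, h4, h⟩
            · rintro (h | ⟨_, _, _, _, h⟩)
              · exact Or.inl h
              · exact Or.inr h
    · rw [if_pos h1]
      constructor
      · exact Or.inl
      · rintro (h | ⟨hq, _⟩)
        · exact h
        · exact absurd hq h1
  rw [pv_mem_foldl_set _ _ v _ hg]
  simp only [PySem.Set.mem_ofList]

theorem memB_mid (digits : List Int) (a : Int) (s : PySem.Set Int) (v : Int) :
    v ∈ pvB_mid (PySem.Dict.counter digits) (PySem.Set.ofList digits) a s ↔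
      v ∈ s ∨ ∃ b : Int, b ∈ digits ∧ ∃ c : Int, c ∈ digits ∧ PySem.Int.mod c 2 = 0 ∧
        ¬((digits.count a : Int) < 1 + (if b = a then 1 else 0) + (if c = a then 1 else 0)) ∧
        ¬((digits.count b : Int) < (if a = b then 1 else 0) + 1 + (if c = b then 1 else 0)) ∧
        ¬((digits.count c : Int) < (if a = c then 1 else 0) + (if b = c then 1 else 0) + 1) ∧
        v = 100 * a + 10 * b + c := by
  unfold pvB_mid
  have hg : ∀ (s : PySem.Set Int) (b : Int),
      v ∈ pvB_inner (PySem.Dict.counter digits) (PySem.Set.ofList digits) a b s ↔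
        v ∈ s ∨ (∃ c : Int, c ∈ digits ∧ PySem.Int.mod c 2 = 0 ∧
          ¬((digits.count a : Int) < 1 + (if b = a then 1 else 0) + (if c = a then 1 else 0)) ∧
          ¬((digits.count b : Int) < (if a = b then 1 else 0) + 1 + (if c = b then 1 else 0)) ∧
          ¬((digits.count c : Int) < (if a = c then 1 else 0) + (if b = c then 1 else 0) + 1) ∧
          v = 100 * a + 10 * b + c) := by
    intro s b
    exact memB_inner digits a b s v
  rw [pv_mem_foldl_set _ _ v _ hg]
  simp only [PySem.Set.mem_ofList]

theorem memB (digits : List Int) (v : Int) :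
    v ∈ pvB_outer (PySem.Dict.counter digits) (PySem.Set.ofList digits) ↔
      ∃ a : Int, a ∈ digits ∧ a ≠ 0 ∧ ∃ b : Int, b ∈ digits ∧ ∃ c : Int, c ∈ digits ∧
        PySem.Int.mod c 2 = 0 ∧
        ¬((digits.count a : Int) < 1 + (if b = a then 1 else 0) + (if c = a then 1 else 0)) ∧
        ¬((digits.count b : Int) < (if a = b then 1 else 0) + 1 + (if c = b then 1 else 0)) ∧
        ¬((digits.count c : Int) < (if a = c then 1 else 0) + (if b = c then 1 else 0) + 1) ∧
        v = 100 * a + 10 * b + c := by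
  unfold pvB_outer
  have hg : ∀ (s : PySem.Set Int) (a : Int),
      v ∈ (if a = 0 then s else pvB_mid (PySem.Dict.counter digits) (PySem.Set.ofList digits) a s) ↔
        v ∈ s ∨ (a ≠ 0 ∧ ∃ b : Int, b ∈ digits ∧ ∃ c : Int, c ∈ digits ∧
          PySem.Int.mod c 2 = 0 ∧
          ¬((digits.count a : Int) < 1 + (if b = a then 1 else 0) + (if c = a then 1 else 0)) ∧
          ¬((digits.count b : Int) < (if a = b then 1 else 0) + 1 + (if c = b then 1 else 0)) ∧
          ¬((digits.count c : Int) < (if a = c then 1 else 0) + (if b = c then 1 else 0) + 1) ∧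
          v = 100 * a + 10 * b + c) := by
    intro s a
    by_cases h1 : a = 0
    · rw [if_pos h1]
      constructor
      · exact Or.inl
      · rintro (h | ⟨hq, _⟩)
        · exact h
        · exact absurd h1 hq
    · rw [if_neg h1, memB_mid]
      constructor
      · rintro (h | ⟨b, hb⟩)
        · exact Or.inl h
        · exact Or.inr ⟨h1, b, hb⟩
      · rintro (h | ⟨_, b, hb⟩)
        · exact Or.inl h
        · exact Or.inr ⟨b, hb⟩
  rw [pv_mem_foldl_set _ _ v _ hg]
  simp only [PySem.Set.mem_ofList, PySem.Set.empty, List.not_mem_nil, false_or]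

-- ----- Nodup of both sets -----
theorem nodupA (digits : List Int) (N : Int) : (pvA_outer digits N).Nodup := by
  unfold pvA_outer
  refine pv_nodup_foldl_set _ _ ?_ _ List.nodup_nil
  intro s i hs
  split_ifs
  · exact hs
  · unfold pvA_mid
    refine pv_nodup_foldl_set _ _ ?_ _ hs
    intro s j hs'
    split_ifs
    · exact hs'
    · unfold pvA_inner
      refine pv_nodup_foldl_set _ _ ?_ _ hs'
      intro s k hs''
      split_ifs <;> first | exact hs'' | exact PySem.Set.nodup_add _ _ hs''

theorem nodupB (cnt : PySem.Dict Int Int) (vals : List Int) : (pvB_outer cnt vals).Nodup := by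
  unfold pvB_outer
  refine pv_nodup_foldl_set _ _ ?_ _ List.nodup_nil
  intro s a hs
  split_ifs
  · exact hs
  · unfold pvB_mid
    refine pv_nodup_foldl_set _ _ ?_ _ hs
    intro s b hs'
    unfold pvB_inner
    refine pv_nodup_foldl_set _ _ ?_ _ hs'
    intro s c hs''
    split_ifs <;> first | exact hs'' | exact PySem.Set.nodup_add _ _ hs''

-- count conditions as stated by B, in Nat form
theorem counts_iff_intform (digits : List Int) (a b c : Int) :
    ((1 + (if b = a then 1 else 0) + (if c = a then 1 else 0) ≤ digits.count a)
      ∧ ((if a = b then 1 else 0) + 1 + (if c = b then 1 else 0) ≤ digits.count b)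
      ∧ ((if a = c then 1 else 0) + (if b = c then 1 else 0) + 1 ≤ digits.count c)) ↔
    (¬((digits.count a : Int) < 1 + (if b = a then 1 else 0) + (if c = a then 1 else 0)) ∧
     ¬((digits.count b : Int) < (if a = b then 1 else 0) + 1 + (if c = b then 1 else 0)) ∧
     ¬((digits.count c : Int) < (if a = c then 1 else 0) + (if b = c then 1 else 0) + 1)) := by
  constructor <;> rintro ⟨h1, h2, h3⟩ <;> refine ⟨?_, ?_, ?_⟩ <;>
    split_ifs at * <;> omega

-- ===== VERDICT (by name: the statement is the Claim_ definition above) =====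
theorem findEvenNumbers2_spec : Claim_equal_findEvenNumbers2 := by
  unfold Claim_equal_findEvenNumbers2
  intro digits _
  unfold Spec_findEvenNumbers2 findEvenNumbers2 findEvenNumbers2_alt
  simp only [PySem.Dict.foldl_insert_getD_add_one_eq_counter, PySem.Dict.keys_counter]
  rw [PySem.List.sorted_id_eq_sorted_id_iff_perm]
  rw [List.perm_ext_iff_of_nodup (nodupA digits _) (nodupB _ _)]
  intro v
  rw [memA, memB]
  constructor
  · rintro ⟨a, b, c, hp, hnz, hmod, hv⟩
    have hcounts := (sub3_iff_counts digits a b c).mp ((pick3_iff digits a b c).mp hp)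
    obtain ⟨ha, hb, hc⟩ := hcounts
    have hma : a ∈ digits := List.count_pos_iff.mp (by omega)
    have hmb : b ∈ digits := List.count_pos_iff.mp (by omega)
    have hmc : c ∈ digits := List.count_pos_iff.mp (by omega)
    obtain ⟨h1, h2, h3⟩ := (counts_iff_intform digits a b c).mp ⟨ha, hb, hc⟩
    exact ⟨a, hma, hnz, b, hmb, c, hmc, hmod, h1, h2, h3, by omega⟩
  · rintro ⟨a, hma, hnz, b, hmb, c, hmc, hmod, h1, h2, h3, hv⟩
    have hcounts := (counts_iff_intform digits a b c).mpr ⟨h1, h2, h3⟩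
    have hp : Pick3 digits a b c :=
      (pick3_iff digits a b c).mpr ((sub3_iff_counts digits a b c).mpr hcounts)
    exact ⟨a, b, c, hp, hnz, hmod, by omega⟩
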